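-- pv_equiv track=rewrite | github.com/Aasthaengg/IBMdataset | Python_codes/p02891/s681216170.py | solve
-- ===== SOURCE A (Python) =====
-- def countProcedure(string):
--   res = 0
--   strCount = 1
--   prev = "" # 1つまえの文字
--   for i in range(len(string)):
--     if string[i] == prev:
--       strCount += 1
--     else:
--       res += strCount // 2
--       strCount = 1
--     prev = string[i]
--
--   if strCount != 1:
--     res += strCount // 2
--   return res
--
-- def solve(s,k):
--   if s[0] != s[-1]:
--     return countProcedure(s)*k
--   if all(x == s[0] for x in s):
--     return len(s)*k//2
--   else:
--     leftLength = max(i for i in range(1,len(s)) if s[:i]== s[0]*i)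
--     left = s[0]*leftLength
--     right = s[leftLength:]
--     ans = countProcedure(left) + countProcedure(right) + countProcedure("".join([right,left]))*(k-1)
--     return ans
-- ===== SOURCE B (Python) =====
-- def solve(s, k):
--     # one linear pass collecting run lengths, then a closed-form combination
--     lens = []
--     cur = s[0]
--     n = 1
--     for c in s[1:]:
--         if c == cur:
--             n += 1
--         else:
--             lens.append(n)
--             cur = c
--             n = 1
--     lens.append(n)
--     if len(lens) == 1:
--         return len(s) * k // 2
--     total = sum(r // 2 for r in lens)
--     if s[0] != s[-1]:
--         return total * k
--     return total + (k - 1) * (total - lens[0] // 2 - lens[-1] // 2 + (lens[0] + lens[-1]) // 2)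
-- ===== Notes on version B (the rewrite author's own statement) =====
-- stated objective: faster
-- what changed: B makes one linear pass collecting maximal run lengths and combines them in closed form, replacing A's quadratic max-over-prefix-comparisons search (s[:i] == s[0]*i) and its rebuilding and re-scanning of left/right/joined strings.
import Mathlib
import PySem

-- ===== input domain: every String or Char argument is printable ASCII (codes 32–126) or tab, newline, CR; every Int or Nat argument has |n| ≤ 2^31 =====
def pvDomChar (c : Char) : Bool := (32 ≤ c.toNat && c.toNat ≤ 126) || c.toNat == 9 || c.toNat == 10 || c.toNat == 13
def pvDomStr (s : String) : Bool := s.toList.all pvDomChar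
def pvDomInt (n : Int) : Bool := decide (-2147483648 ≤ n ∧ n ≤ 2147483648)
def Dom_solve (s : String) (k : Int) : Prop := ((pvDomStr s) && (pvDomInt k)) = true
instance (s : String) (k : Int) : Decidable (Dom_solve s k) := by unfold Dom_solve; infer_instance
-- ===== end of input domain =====

-- B replaces A's quadratic prefix-comparison search (s[:i] == s[0]*i for every i) and string
-- rebuilding by a single linear pass collecting run lengths plus a closed-form combination.

-- ===== PORT A =====
-- the for-loop of countProcedure: state (res, strCount), prev as Option Char (none = initial "")
def countLoop : List Char → Int → Int → Option Char → Int × Int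
  | [], res, cnt, _ => (res, cnt)
  | c :: rest, res, cnt, prev =>
      if some c = prev then countLoop rest res (cnt + 1) (some c)
      else countLoop rest (res + PySem.Int.floordiv cnt 2) 1 (some c)

def countProcedure (cs : List Char) : Int :=
  match countLoop cs 0 1 none with
  | (res, cnt) => if cnt ≠ 1 then res + PySem.Int.floordiv cnt 2 else res

def solveCore (cs : List Char) (k : Int) : Int :=
  let c0 := (PySem.List.pyGet? cs 0).getD ' '
  let clast := (PySem.List.pyGet? cs (-1)).getD ' '
  if c0 ≠ clast then countProcedure cs * k
  else if cs.all (fun x => x == c0) then PySem.Int.floordiv ((cs.length : Int) * k) 2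
  else
    let leftLength := (PySem.List.max? ((PySem.List.pyRange 1 (cs.length : Int) 1).filter
        (fun i => PySem.List.slice cs none (some i) == List.replicate i.toNat c0)) (fun x => x)).getD 0
    let left := List.replicate leftLength.toNat c0
    let right := PySem.List.slice cs (some leftLength) none
    countProcedure left + countProcedure right + countProcedure (right ++ left) * (k - 1)

def solve (s : String) (k : Int) : Int := solveCore s.toList k

-- ===== PORT B =====
-- the for-loop of B: collect the maximal-run lengths in one pass (current char, current count)
def runsAux : List Char → Char → Int → List Int
  | [], _, n => [n]
  | c :: rest, cur, n =>
      if c = cur then runsAux rest cur (n + 1) else n :: runsAux rest c 1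

def solveAltCore (cs : List Char) (k : Int) : Int :=
  match cs with
  | [] => 0   -- unreachable under Pre_solve (Python B raises IndexError on "")
  | c :: rest =>
    let lens := runsAux rest c 1
    if lens.length = 1 then PySem.Int.floordiv (((c :: rest).length : Int) * k) 2
    else
      let total := (lens.map (fun r => PySem.Int.floordiv r 2)).sum
      if (c :: rest).getLast? ≠ some c then total * k
      else
        total + (k - 1) * (total - PySem.Int.floordiv (lens.headD 0) 2
          - PySem.Int.floordiv (lens.getLastD 0) 2
          + PySem.Int.floordiv (lens.headD 0 + lens.getLastD 0) 2)

def solve_alt (s : String) (k : Int) : Int := solveAltCore s.toList k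

-- ===== PRECONDITION & SPEC =====
-- Pre_ excludes only the empty string, on which A raises IndexError at s[0].
def Pre_solve (s : String) (k : Int) : Prop := s.toList ≠ []
instance (s : String) (k : Int) : Decidable (Pre_solve s k) := by unfold Pre_solve; infer_instance
def pvWitness_solve : String × Int := ("aab", 3)

def Spec_solve (s : String) (k : Int) (out : Int) : Prop := out = solve_alt s k
instance (s : String) (k : Int) (out : Int) : Decidable (Spec_solve s k out) := by unfold Spec_solve; infer_instance

-- ===== CLAIM (what is proved, stated in full; the proofs are below) =====
def Claim_equal_solve : Prop := ∀ (s : String) (k : Int), Dom_solve s k → Pre_solve s k → Spec_solve s k (solve s k)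

-- ===== LEMMAS AND PROOFS =====

theorem runsAux_ne_nil (t : List Char) (c : Char) (n : Int) : runsAux t c n ≠ [] := by
  induction t generalizing c n with
  | nil => simp [runsAux]
  | cons e t ih => simp only [runsAux]; split <;> simp [ih]

theorem countLoop_sum (t : List Char) (c : Char) (n res : Int) :
    (countLoop t res n (some c)).1 + PySem.Int.floordiv (countLoop t res n (some c)).2 2
      = res + ((runsAux t c n).map (fun r => PySem.Int.floordiv r 2)).sum := by
  induction t generalizing c n res with
  | nil => simp [countLoop, runsAux]
  | cons e t ih =>
    simp only [countLoop, runsAux]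
    by_cases h : e = c
    · subst h
      rw [if_pos rfl, if_pos rfl]
      exact ih e (n + 1) res
    · have h' : ¬ (some e = some c) := by simp [h]
      rw [if_neg h', if_neg h, ih e 1 (res + PySem.Int.floordiv n 2)]
      simp only [List.map_cons, List.sum_cons]
      ring

theorem countProcedure_runs (c : Char) (rest : List Char) :
    countProcedure (c :: rest)
      = ((runsAux rest c 1).map (fun r => PySem.Int.floordiv r 2)).sum := by
  have h0 : PySem.Int.floordiv 1 2 = 0 := by decide
  have step : countLoop (c :: rest) 0 1 none = countLoop rest 0 1 (some c) := by
    simp [countLoop]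
  have key := countLoop_sum rest c 1 0
  unfold countProcedure
  rw [step]
  rcases hcl : countLoop rest 0 1 (some c) with ⟨res, cnt⟩
  rw [hcl] at key
  simp only at key
  by_cases hc : cnt = 1
  · subst hc; simpa [h0] using key
  · simpa [hc] using key

theorem runsAux_length_one_iff (t : List Char) (c : Char) (n : Int) :
    (runsAux t c n).length = 1 ↔ t.all (· == c) := by
  induction t generalizing c n with
  | nil => simp [runsAux]
  | cons e t ih =>
    simp only [runsAux, List.all_cons]
    by_cases h : e = c
    · simp [h, ih]
    · rw [if_neg h]
      constructor
      · intro hlen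
        exfalso
        have hpos := List.length_pos_of_ne_nil (runsAux_ne_nil t e 1)
        simp only [List.length_cons] at hlen
        omega
      · intro hall
        rw [Bool.and_eq_true, beq_iff_eq] at hall
        exact absurd hall.1 h

theorem runsAux_replicate_append (m : Nat) :
    ∀ (t : List Char) (c : Char) (n : Int),
    runsAux (List.replicate m c ++ t) c n = runsAux t c (n + m) := by
  induction m with
  | zero => intro t c n; simp [List.replicate]
  | succ m ih =>
    intro t c n
    have hcast : n + 1 + (m : Int) = n + ((m + 1 : Nat) : Int) := by push_cast; ring
    simp only [List.replicate_succ, List.cons_append, runsAux]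
    split
    · rw [ih, hcast]
    · rename_i hfalse
      exact absurd trivial hfalse

def addLast : List Int → Int → List Int
  | [], _ => []
  | [x], m => [x + m]
  | x :: y :: xs, m => x :: addLast (y :: xs) m

theorem addLast_cons {l : List Int} (hl : l ≠ []) (x m : Int) :
    addLast (x :: l) m = x :: addLast l m := by
  cases l with
  | nil => exact absurd rfl hl
  | cons y ys => rfl

theorem runsAux_append_replicate (m : Nat) (c0 : Char) :
    ∀ (t : List Char) (c : Char) (n : Int), (c :: t).getLast? = some c0 →
    runsAux (t ++ List.replicate m c0) c n = addLast (runsAux t c n) m := by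
  intro t
  induction t with
  | nil =>
    intro c n h
    simp only [List.getLast?_singleton, Option.some.injEq] at h
    subst h
    have h2 := runsAux_replicate_append m ([] : List Char) c n
    simp only [List.append_nil] at h2
    simp only [List.nil_append, h2, runsAux, addLast]
  | cons e t ih =>
    intro c n h
    have hlast : (e :: t).getLast? = some c0 := by
      rwa [List.getLast?_cons_cons] at h
    simp only [List.cons_append, runsAux]
    by_cases he : e = c
    · subst he
      rw [if_pos rfl, if_pos rfl, ih e (n + 1) hlast]
    · rw [if_neg he, if_neg he, ih e 1 hlast,
        addLast_cons (runsAux_ne_nil t e 1)]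

theorem sum_addLast (f : Int → Int) (m : Int) :
    ∀ (l : List Int), l ≠ [] →
    ((addLast l m).map f).sum
      = (l.map f).sum - f (l.getLastD 0) + f (l.getLastD 0 + m) := by
  intro l
  induction l with
  | nil => intro h; exact absurd rfl h
  | cons x l ih =>
    intro _
    cases l with
    | nil =>
      simp only [addLast, List.map_cons, List.map_nil, List.sum_cons, List.sum_nil,
        List.getLastD_cons, List.getLastD_nil]
      ring
    | cons y ys =>
      have h2 : (y :: ys : List Int) ≠ [] := by simp
      rw [addLast_cons h2, List.map_cons, List.sum_cons, ih h2]
      simp only [List.map_cons, List.sum_cons, List.getLastD_cons]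
      ring

-- takeWhile is a replicate of the scanned character
theorem takeWhile_eq_replicate (c : Char) :
    ∀ (l : List Char), l.takeWhile (· == c) = List.replicate (l.takeWhile (· == c)).length c := by
  intro l
  induction l with
  | nil => simp
  | cons e t ih =>
    by_cases h : e = c
    · subst h; simpa [List.takeWhile_cons, List.replicate_succ] using ih
    · simp [h]

theorem head_dropWhile_ne (c : Char) :
    ∀ (l : List Char) (d : Char) (dt : List Char), l.dropWhile (· == c) = d :: dt → ¬ d = c := by
  intro l
  induction l with
  | nil => intro d dt h; simp at h
  | cons e t ih =>
    intro d dt h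
    by_cases he : e = c
    · rw [List.dropWhile_cons_of_pos (by simp [he])] at h; exact ih d dt h
    · rw [List.dropWhile_cons_of_neg (by simp [he])] at h
      cases h; exact he

-- A's generator-with-max computes the leading-run length: the filtered range is [1, m0+1]
theorem filter_prefix_eq (m0 : Nat) (c d : Char) (dt : List Char) (hd : ¬ d = c) :
    (PySem.List.pyRange 1 ((List.replicate (m0 + 1) c ++ d :: dt).length : Int) 1).filter
        (fun i => PySem.List.slice (List.replicate (m0 + 1) c ++ d :: dt) none (some i)
            == List.replicate i.toNat c)
      = PySem.List.pyRange 1 ((1 + (m0 : Int)) + 1) 1 := by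
  have hm0 : (0 : Int) ≤ (m0 : Int) := Int.natCast_nonneg m0
  have hlen : ((List.replicate (m0 + 1) c ++ d :: dt).length : Int)
      = (m0 : Int) + 2 + (dt.length : Int) := by
    simp [List.length_append, List.length_replicate]
    ring
  have hdtlen : (0 : Int) ≤ (dt.length : Int) := Int.natCast_nonneg _
  rw [PySem.List.pyRange_one_append 1 ((1 + (m0 : Int)) + 1) _ (by omega) (by rw [hlen]; omega)]
  rw [List.filter_append]
  have h1 : (PySem.List.pyRange 1 ((1 + (m0 : Int)) + 1) 1).filter
      (fun i => PySem.List.slice (List.replicate (m0 + 1) c ++ d :: dt) none (some i)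
          == List.replicate i.toNat c)
      = PySem.List.pyRange 1 ((1 + (m0 : Int)) + 1) 1 := by
    rw [List.filter_eq_self]
    intro i hi
    rw [PySem.List.mem_pyRange_one] at hi
    have h0i : (0 : Int) ≤ i := by omega
    have hile : i.toNat ≤ m0 + 1 := by omega
    rw [PySem.List.slice_to _ h0i]
    rw [List.take_append_of_le_length (by simp [List.length_replicate]; omega)]
    rw [List.take_replicate, Nat.min_eq_left hile]
    exact beq_self_eq_true _
  have h2 : (PySem.List.pyRange ((1 + (m0 : Int)) + 1) ((List.replicate (m0 + 1) c ++ d :: dt).length : Int) 1).filter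
      (fun i => PySem.List.slice (List.replicate (m0 + 1) c ++ d :: dt) none (some i)
          == List.replicate i.toNat c)
      = [] := by
    rw [List.filter_eq_nil_iff]
    intro i hi
    rw [PySem.List.mem_pyRange_one] at hi
    have h0i : (0 : Int) ≤ i := by omega
    intro hbeq
    have heq : PySem.List.slice (List.replicate (m0 + 1) c ++ d :: dt) none (some i)
        = List.replicate i.toNat c := by
      exact eq_of_beq hbeq
    rw [PySem.List.slice_to _ h0i] at heq
    -- i.toNat ≥ m0 + 2, so the taken prefix contains the mismatching d at position m0+1
    have hgt : m0 + 1 < i.toNat := by omega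
    have hL : ((List.replicate (m0 + 1) c ++ d :: dt).take i.toNat)[m0 + 1]? = some d := by
      rw [List.getElem?_take_of_lt hgt, List.getElem?_append_right (by simp)]
      simp
    rw [heq, List.getElem?_replicate, if_pos hgt] at hL
    exact hd ((by simpa using hL : c = d).symm)
  rw [h1, h2, List.append_nil]

theorem max_pyRange_id (M : Int) (h1 : 1 ≤ M) :
    PySem.List.max? (PySem.List.pyRange 1 (M + 1) 1) (fun x => x) = some M := by
  have hmem : M ∈ PySem.List.pyRange 1 (M + 1) 1 :=
    PySem.List.mem_pyRange_one.mpr ⟨h1, by omega⟩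
  cases hmax : PySem.List.max? (PySem.List.pyRange 1 (M + 1) 1) (fun x => x) with
  | none =>
    rw [PySem.List.max?_eq_none_iff] at hmax
    rw [hmax] at hmem
    simp at hmem
  | some x =>
    have hx := PySem.List.max?_mem hmax
    have hxle : x ≤ M := by
      have := PySem.List.mem_pyRange_one.mp hx
      omega
    have hMx : M ≤ x := PySem.List.max?_isMax hmax M hmem
    rw [le_antisymm hxle hMx]

-- the main list-level equivalence
theorem core_eq (cs : List Char) (k : Int) (hne : cs ≠ []) :
    solveCore cs k = solveAltCore cs k := by
  obtain ⟨c, rest, rfl⟩ := List.exists_cons_of_ne_nil hne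
  have hc0 : (PySem.List.pyGet? (c :: rest) 0).getD ' ' = c := by
    rw [PySem.List.pyGet?_zero_cons]; rfl
  have hlastS : (c :: rest).getLast? = some ((c :: rest).getLast (by simp)) :=
    List.getLast?_eq_getLast_of_ne_nil _
  have hclast : (PySem.List.pyGet? (c :: rest) (-1)).getD ' '
      = (c :: rest).getLast (by simp) := by
    rw [PySem.List.pyGet?_neg_one, hlastS]; rfl
  by_cases hall : rest.all (· == c) = true
  · -- all characters equal: both return len*k//2
    have hlc : (c :: rest).getLast (by simp) = c := by
      have hmem := List.getLast_mem (l := c :: rest) (by simp)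
      rcases List.mem_cons.mp hmem with h | h
      · exact h
      · exact beq_iff_eq.mp (List.all_eq_true.mp hall _ h)
    have hallcs : (c :: rest).all (fun x => x == c) = true := by
      simp [List.all_cons, hall]
    have hlen1 : (runsAux rest c 1).length = 1 := (runsAux_length_one_iff rest c 1).mpr hall
    simp only [solveCore, solveAltCore, hc0, hclast, hlc]
    rw [if_neg (by simp), if_pos hallcs, if_pos hlen1]
  · -- not all equal: decompose into leading run ++ (d :: dt) with d ≠ c
    have hsplit : rest.takeWhile (· == c) ++ rest.dropWhile (· == c) = rest :=
      List.takeWhile_append_dropWhile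
    have hdw_ne : rest.dropWhile (· == c) ≠ [] := by
      intro h
      apply hall
      rw [List.all_eq_true]
      intro x hx
      rw [h, List.append_nil] at hsplit
      rw [← hsplit] at hx
      exact List.mem_takeWhile_imp (p := fun y => y == c) hx
    obtain ⟨d, dt, hddt⟩ := List.exists_cons_of_ne_nil hdw_ne
    have hd : ¬ d = c := head_dropWhile_ne c rest d dt hddt
    have hrest : rest = List.replicate (rest.takeWhile (· == c)).length c ++ d :: dt := by
      conv_lhs => rw [← hsplit]
      rw [hddt, takeWhile_eq_replicate c rest, List.length_replicate]
    set m0 := (rest.takeWhile (· == c)).length with hm0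
    have hlens : runsAux rest c 1 = (1 + (m0 : Int)) :: runsAux dt d 1 := by
      rw [hrest, runsAux_replicate_append m0 (d :: dt) c 1]
      simp only [runsAux, if_neg hd]
    have hrne : runsAux dt d 1 ≠ [] := runsAux_ne_nil dt d 1
    have hlen_ne : ¬ ((runsAux rest c 1).length = 1) := by
      rw [hlens]
      have hpos := List.length_pos_of_ne_nil hrne
      simp only [List.length_cons]
      omega
    have hcpA := countProcedure_runs c rest
    by_cases hlc : (c :: rest).getLast (by simp) = c
    · -- s[0] == s[-1] and not all equal: the interesting branch
      have hlast_c : (c :: rest).getLast? = some c := by rw [hlastS, hlc]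
      have hcs : c :: rest = List.replicate (m0 + 1) c ++ d :: dt := by
        rw [List.replicate_succ, List.cons_append, ← hrest]
      have hlast_ddt : (d :: dt).getLast? = some c := by
        have h1 : (d :: dt).getLast? = some ((d :: dt).getLast (by simp)) :=
          List.getLast?_eq_getLast_of_ne_nil _
        rw [hcs, List.getLast?_append, h1] at hlast_c
        rw [h1]
        simpa using hlast_c
      have hallcs : ¬ ((c :: rest).all (fun x => x == c) = true) := by
        intro h
        exact hall (by simpa using h)
      -- the computed leftLength is 1 + m0
      have hmax : (PySem.List.max? ((PySem.List.pyRange 1 (((c :: rest).length : Int)) 1).filter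
          (fun i => PySem.List.slice (c :: rest) none (some i) == List.replicate i.toNat c))
          (fun x => x)).getD 0 = 1 + (m0 : Int) := by
        have hm0nn : (0 : Int) ≤ (m0 : Int) := Int.natCast_nonneg m0
        rw [hcs, filter_prefix_eq m0 c d dt hd, max_pyRange_id (1 + (m0 : Int)) (by omega)]
        rfl
      have hm0nn : (0 : Int) ≤ (m0 : Int) := Int.natCast_nonneg m0
      have htoNat : (1 + (m0 : Int)).toNat = m0 + 1 := by omega
      -- left and right pieces
      have hleft : List.replicate (1 + (m0 : Int)).toNat c = List.replicate (m0 + 1) c := by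
        rw [htoNat]
      have hright : PySem.List.slice (c :: rest) (some (1 + (m0 : Int))) none = d :: dt := by
        rw [PySem.List.slice_from _ (by omega), htoNat, hcs]
        rw [List.drop_append_of_le_length (by simp)]
        simp
      -- countProcedure of the three pieces
      have hcpLeft : countProcedure (List.replicate (m0 + 1) c)
          = PySem.Int.floordiv (1 + (m0 : Int)) 2 := by
        rw [List.replicate_succ, countProcedure_runs]
        have := runsAux_replicate_append m0 ([] : List Char) c 1
        rw [List.append_nil] at this
        rw [this]
        simp [runsAux]
      have hcpRight : countProcedure (d :: dt)
          = ((runsAux dt d 1).map (fun r => PySem.Int.floordiv r 2)).sum :=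
        countProcedure_runs d dt
      have hcpJoin : countProcedure (d :: (dt ++ List.replicate (m0 + 1) c))
          = ((runsAux dt d 1).map (fun r => PySem.Int.floordiv r 2)).sum
            - PySem.Int.floordiv ((runsAux dt d 1).getLastD 0) 2
            + PySem.Int.floordiv ((runsAux dt d 1).getLastD 0 + (1 + (m0 : Int))) 2 := by
        rw [countProcedure_runs, runsAux_append_replicate (m0 + 1) c dt d 1 hlast_ddt]
        rw [sum_addLast _ _ _ hrne]
        push_cast
        ring_nf
      -- evaluate A
      simp only [solveCore, solveAltCore, hc0, hclast, hlc]
      rw [if_neg (by simp), if_neg hallcs, if_neg hlen_ne,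
        if_neg (by rw [hlast_c]; simp)]
      rw [hmax, hleft, hright, hcpLeft, hcpRight]
      have hjoin2 : (d :: dt) ++ List.replicate (m0 + 1) c
          = d :: (dt ++ List.replicate (m0 + 1) c) := by simp
      rw [hjoin2, hcpJoin]
      -- evaluate B's pieces
      rw [hlens]
      have hheadD : ((1 + (m0 : Int)) :: runsAux dt d 1).headD 0 = 1 + (m0 : Int) := rfl
      have hgetLastD : ((1 + (m0 : Int)) :: runsAux dt d 1).getLastD 0
          = (runsAux dt d 1).getLastD 0 := by
        rw [List.getLastD_cons]
        rw [List.getLastD_eq_getLast?, List.getLastD_eq_getLast?,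
          List.getLast?_eq_getLast_of_ne_nil hrne]
        rfl
      rw [hheadD, hgetLastD]
      simp only [List.map_cons, List.sum_cons]
      rw [show (runsAux dt d 1).getLastD 0 + (1 + (m0 : Int))
            = 1 + (m0 : Int) + (runsAux dt d 1).getLastD 0 by ring]
      ring
    · -- s[0] != s[-1]: both return total * k
      simp only [solveCore, solveAltCore, hc0, hclast]
      rw [if_pos (fun h => hlc h.symm), if_neg hlen_ne,
        if_pos (by rw [hlastS]; simpa using fun h => hlc h), hcpA]

-- ===== VERDICT (by name: the statement is the Claim_ definition above) =====
theorem solve_spec : Claim_equal_solve := by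
  intro s k _ hpre
  unfold Spec_solve solve solve_alt
  exact core_eq s.toList k hpre
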